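-- pv_equiv track=rewrite | github.com/17000cyh/IMDiffusion | ensemble_proper.py | compute_add
-- ===== SOURCE A (Python) =====
-- def compute_add(prediction, labels):
--     labels = labels[:len(prediction)]
--
--     now_anomaly_flag = False  # 当前点是否是异常点
--     find_anomaly_flag = False  # 当前是否有找到这段异常点
--
--     latency_list = []
--     latency = 0
--
--     for i, label in enumerate(labels):
--         if not label:
--             if now_anomaly_flag:  # 上一个点是异常点
--                 latency_list.append(latency)
--                 now_anomaly_flag = False
--                 find_anomaly_flag = False
--                 latency = 0
--             else:
--                 pass
--         else:
--             now_anomaly_flag = True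
--             if prediction[i]:
--                 find_anomaly_flag = True
--
--             if not find_anomaly_flag:
--                 latency += 1
--             else:
--                 pass
--
--     if latency > 0:
--         latency_list.append(latency)
--
--     return latency_list
-- ===== SOURCE B (Python) =====
-- def compute_add(prediction, labels):
--     labels = labels[:len(prediction)]
--     n = len(labels)
--
--     # Pass 1: partition labels into maximal runs of truthy values as [start, end) bounds.
--     runs = []
--     start = None
--     for i, v in enumerate(labels):
--         if start is None:
--             if v:
--                 start = i
--         else:
--             if not v:
--                 runs.append((start, i))
--                 start = None
--     if start is not None:
--         runs.append((start, n))
--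
--     # Pass 2: latency of a run = offset of its first predicted point, or its length.
--     latency_list = []
--     for s, e in runs:
--         lat = next((j - s for j in range(s, e) if prediction[j]), e - s)
--         if e < n or lat > 0:
--             latency_list.append(lat)
--     return latency_list
-- ===== Notes on version B (the rewrite author's own statement) =====
-- stated objective: alternative
-- what changed: A's single pass with now/find flags and an interleaved latency accumulator is replaced by two passes: first partition the truncated labels into maximal truthy runs as [start,end) bounds, then map each run to its latency (offset of first predicted point, else run length), appending it unless the run touches the end with latency 0.
import Mathlib
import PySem

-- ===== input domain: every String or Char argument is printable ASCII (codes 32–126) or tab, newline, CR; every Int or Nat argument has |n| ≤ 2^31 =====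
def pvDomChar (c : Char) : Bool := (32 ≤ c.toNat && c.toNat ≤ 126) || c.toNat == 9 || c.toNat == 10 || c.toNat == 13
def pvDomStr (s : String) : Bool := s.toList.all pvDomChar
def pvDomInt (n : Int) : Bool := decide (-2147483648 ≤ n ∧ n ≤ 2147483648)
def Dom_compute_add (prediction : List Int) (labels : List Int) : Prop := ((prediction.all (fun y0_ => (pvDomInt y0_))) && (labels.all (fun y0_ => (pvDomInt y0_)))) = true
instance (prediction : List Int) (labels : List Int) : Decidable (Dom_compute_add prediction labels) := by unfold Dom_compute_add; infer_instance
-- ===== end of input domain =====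

-- B replaces A's flag-machine loop by two passes (collect the truthy-label runs, then map each
-- run to its latency); an alternative decomposition, same O(n) cost.

-- ===== PORT A =====
-- loop body of A's for-loop; state = (now_anomaly_flag, find_anomaly_flag, latency_list, latency).
-- prediction[p.1] is always in range when reached (p.1 < len(labels') ≤ len(prediction)),
-- so pyGetD with default 0 is exact here.
def stepA (prediction : List Int) (st : Bool × Bool × List Int × Int) (p : Int × Int) :
    Bool × Bool × List Int × Int :=
  if p.2 = 0 then
    if st.1 then (false, false, st.2.2.1 ++ [st.2.2.2], 0) else st
  else
    let find' := if PySem.List.pyGetD prediction p.1 0 ≠ 0 then true else st.2.1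
    if find' = false then (true, find', st.2.2.1, st.2.2.2 + 1)
    else (true, find', st.2.2.1, st.2.2.2)

def compute_add (prediction : List Int) (labels : List Int) : List Int :=
  let labels' := PySem.List.slice labels none (some (prediction.length : Int))
  let st := (PySem.List.enumerate labels' 0).foldl (stepA prediction)
      (false, false, ([] : List Int), (0 : Int))
  if st.2.2.2 > 0 then st.2.2.1 ++ [st.2.2.2] else st.2.2.1

-- ===== PORT B =====
-- pass 1 of B: maximal runs of truthy labels as [start, end) pairs (n closes a run at the end).
def runsB (xs : List (Int × Int)) (start : Option Int) (n : Int) : List (Int × Int) :=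
  match xs, start with
  | [], none => []
  | [], some s => [(s, n)]
  | p :: rest, none => if p.2 ≠ 0 then runsB rest (some p.1) n else runsB rest none n
  | p :: rest, some s => if p.2 = 0 then (s, p.1) :: runsB rest none n else runsB rest (some s) n

-- B's 'next((j - s for j in range(s, e) if prediction[j]), e - s)', scanning the range list.
-- prediction[j] is always in range when reached, so pyGetD with default 0 is exact here.
def latB (prediction : List Int) (s : Int) (js : List Int) (e : Int) : Int :=
  match js with
  | [] => e - s
  | j :: rest => if PySem.List.pyGetD prediction j 0 ≠ 0 then j - s else latB prediction s rest e

-- pass 2 of B: append each run's latency unless the run touches the end with latency 0.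
def selB (prediction : List Int) (n : Int) (r : Int × Int) : Option Int :=
  let l := latB prediction r.1 (PySem.List.pyRange r.1 r.2 1) r.2
  if r.2 < n ∨ l > 0 then some l else none

def compute_add_alt (prediction : List Int) (labels : List Int) : List Int :=
  let labels' := PySem.List.slice labels none (some (prediction.length : Int))
  let n : Int := labels'.length
  (runsB (PySem.List.enumerate labels' 0) none n).filterMap (selB prediction n)

-- ===== PRECONDITION & SPEC =====
def Spec_compute_add (prediction : List Int) (labels : List Int) (out : List Int) : Prop := out = compute_add_alt prediction labels
instance (prediction : List Int) (labels : List Int) (out : List Int) : Decidable (Spec_compute_add prediction labels out) := by unfold Spec_compute_add; infer_instance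

-- ===== CLAIM (what is proved, stated in full; the proofs are below) =====
def Claim_equal_compute_add : Prop := ∀ (prediction : List Int) (labels : List Int), Dom_compute_add prediction labels → Spec_compute_add prediction labels (compute_add prediction labels)

-- ===== LEMMAS AND PROOFS =====

-- Acc-free form of A's loop (the invariant now = false → find = false ∧ lat = 0 is kept).
def aCore (pred : List Int) (i : Int) (xs : List Int) (now find : Bool) (lat : Int) : List Int :=
  match xs with
  | [] => if lat > 0 then [lat] else []
  | x :: rest =>
    if x = 0 then
      if now then lat :: aCore pred (i+1) rest false false 0
      else aCore pred (i+1) rest false false 0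
    else
      let f' := if PySem.List.pyGetD pred i 0 ≠ 0 then true else find
      aCore pred (i+1) rest true f' (if f' = false then lat + 1 else lat)

-- shorthand: latency of the run [s, e) scanned from its start
def LB (pred : List Int) (s e : Int) : Int := latB pred s (PySem.List.pyRange s e 1) e

theorem LB_self (pred : List Int) (s : Int) : LB pred s s = 0 := by
  simp [LB, PySem.List.pyRange_one_eq_nil (le_refl s), latB]

theorem latB_shift (pred : List Int) (s t : Int) (js : List Int) (e : Int) :
    latB pred s js e = latB pred t js e + (t - s) := by
  induction js with
  | nil => simp only [latB]; ring
  | cons j rest ih => by_cases h : PySem.List.pyGetD pred j 0 ≠ 0 <;> simp [latB, h, ih]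

theorem LB_step (pred : List Int) (s e : Int) (h : s < e) :
    LB pred s e = if PySem.List.pyGetD pred s 0 ≠ 0 then 0 else 1 + LB pred (s+1) e := by
  unfold LB
  rw [PySem.List.pyRange_one_cons h]
  by_cases hp : PySem.List.pyGetD pred s 0 ≠ 0
  · simp [latB, hp]
  · simp only [latB, hp, if_false]
    rw [latB_shift pred s (s+1)]
    simp
    ring

theorem foldA (pred : List Int) (xs : List Int) :
    ∀ (i : Int) (now find : Bool) (acc : List Int) (lat : Int),
    (now = false → find = false ∧ lat = 0) →
    (let st := (PySem.List.enumerate xs i).foldl (stepA pred) (now, find, acc, lat);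
     if st.2.2.2 > 0 then st.2.2.1 ++ [st.2.2.2] else st.2.2.1)
      = acc ++ aCore pred i xs now find lat := by
  induction xs with
  | nil =>
    intro i now find acc lat _
    simp only [PySem.List.enumerate_nil, List.foldl_nil, aCore]
    split_ifs <;> simp
  | cons x rest ih =>
    intro i now find acc lat hinv
    rw [PySem.List.enumerate_cons, List.foldl_cons]
    by_cases hx : x = 0
    · cases now with
      | true =>
        have e1 : stepA pred (true, find, acc, lat) (i, x) = (false, false, acc ++ [lat], 0) := by
          simp [stepA, hx]
        rw [e1, ih (i+1) false false (acc ++ [lat]) 0 (by simp)]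
        simp [aCore, hx]
      | false =>
        rcases hinv rfl with ⟨hf, hl⟩
        subst hf; subst hl
        have e1 : stepA pred (false, false, acc, 0) (i, x) = (false, false, acc, 0) := by
          simp [stepA, hx]
        rw [e1, ih (i+1) false false acc 0 (by simp)]
        simp [aCore, hx]
    · by_cases hp : PySem.List.pyGetD pred i 0 ≠ 0
      · have e1 : stepA pred (now, find, acc, lat) (i, x) = (true, true, acc, lat) := by
          simp [stepA, hx, hp]
        rw [e1, ih (i+1) true true acc lat (by simp)]
        simp [aCore, hx, hp]
      · cases find with
        | true =>
          have e1 : stepA pred (now, true, acc, lat) (i, x) = (true, true, acc, lat) := by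
            simp [stepA, hx, hp]
          rw [e1, ih (i+1) true true acc lat (by simp)]
          simp [aCore, hx, hp]
        | false =>
          have e1 : stepA pred (now, false, acc, lat) (i, x) = (true, false, acc, lat + 1) := by
            simp [stepA, hx, hp]
          rw [e1, ih (i+1) true false acc (lat + 1) (by simp)]
          simp [aCore, hx, hp]

theorem mainAB (pred : List Int) : ∀ (xs : List Int) (n i : Int),
    i + xs.length = n →
    (aCore pred i xs false false 0
        = (runsB (PySem.List.enumerate xs i) none n).filterMap (selB pred n))
    ∧ (∀ (s : Int) (find : Bool) (lat : Int),
        (∀ e', i ≤ e' → LB pred s e' = if find then lat else lat + LB pred i e') →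
        aCore pred i xs true find lat
          = (runsB (PySem.List.enumerate xs i) (some s) n).filterMap (selB pred n)) := by
  intro xs
  induction xs with
  | nil =>
    intro n i hn
    constructor
    · simp [aCore, PySem.List.enumerate_nil, runsB]
    · intro s find lat H
      have hni : i = n := by simpa using hn
      subst hni
      have hl := H i (le_refl i)
      rw [LB_self] at hl
      have hl' : LB pred s i = lat := by cases find <;> simpa using hl
      simp only [PySem.List.enumerate_nil, runsB, List.filterMap_cons, List.filterMap_nil,
        selB, aCore]
      rw [← LB, hl']
      have hnn : ¬ (i < i) := lt_irrefl i
      simp only [hnn, false_or]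
      split_ifs <;> simp
  | cons x rest ih =>
    intro n i hn
    have hn' : (i+1) + rest.length = n := by simp at hn ⊢; omega
    have hin : i < n := by simp at hn; omega
    constructor
    · rw [PySem.List.enumerate_cons]
      by_cases hx : x = 0
      · have er : runsB ((i, x) :: PySem.List.enumerate rest (i+1)) none n
            = runsB (PySem.List.enumerate rest (i+1)) none n := by simp [runsB, hx]
        rw [er]
        have ea : aCore pred i (x :: rest) false false 0
            = aCore pred (i+1) rest false false 0 := by simp [aCore, hx]
        rw [ea]
        exact (ih n (i+1) hn').1
      · have er : runsB ((i, x) :: PySem.List.enumerate rest (i+1)) none n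
            = runsB (PySem.List.enumerate rest (i+1)) (some i) n := by simp [runsB, hx]
        rw [er]
        have ea : aCore pred i (x :: rest) false false 0
            = aCore pred (i+1) rest true (if PySem.List.pyGetD pred i 0 ≠ 0 then true else false)
                (if (if PySem.List.pyGetD pred i 0 ≠ 0 then true else false) = false then 0 + 1 else 0) := by
          simp only [aCore, hx, if_false]
        rw [ea]
        apply (ih n (i+1) hn').2 i
        intro e' he'
        rw [LB_step pred i e' (by omega)]
        by_cases hp : PySem.List.pyGetD pred i 0 ≠ 0 <;> simp [hp]
    · intro s find lat H
      rw [PySem.List.enumerate_cons]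
      by_cases hx : x = 0
      · have hl := H i (le_refl i)
        rw [LB_self] at hl
        have hl' : LB pred s i = lat := by cases find <;> simpa using hl
        have hsel : selB pred n (s, i) = some lat := by
          simp only [selB]
          rw [← LB, hl']
          simp [hin]
        have er : runsB ((i, x) :: PySem.List.enumerate rest (i+1)) (some s) n
            = (s, i) :: runsB (PySem.List.enumerate rest (i+1)) none n := by simp [runsB, hx]
        have ea : aCore pred i (x :: rest) true find lat
            = lat :: aCore pred (i+1) rest false false 0 := by simp [aCore, hx]
        rw [er, ea, List.filterMap_cons, hsel, (ih n (i+1) hn').1]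
      · have er : runsB ((i, x) :: PySem.List.enumerate rest (i+1)) (some s) n
            = runsB (PySem.List.enumerate rest (i+1)) (some s) n := by simp [runsB, hx]
        have ea : aCore pred i (x :: rest) true find lat
            = aCore pred (i+1) rest true (if PySem.List.pyGetD pred i 0 ≠ 0 then true else find)
                (if (if PySem.List.pyGetD pred i 0 ≠ 0 then true else find) = false then lat + 1 else lat) := by
          simp only [aCore, hx, if_false]
        rw [er, ea]
        apply (ih n (i+1) hn').2 s
        intro e' he'
        have hse := H e' (by omega)
        rw [LB_step pred i e' (by omega)] at hse
        by_cases hp : PySem.List.pyGetD pred i 0 ≠ 0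
        · rw [if_pos hp] at hse
          cases find <;> simp_all
        · rw [if_neg hp] at hse
          cases find <;> simp_all
          ring

-- ===== VERDICT (by name: the statement is the Claim_ definition above) =====
theorem compute_add_spec : Claim_equal_compute_add := by
  intro prediction labels _
  unfold Spec_compute_add compute_add compute_add_alt
  have h1 := foldA prediction (PySem.List.slice labels none (some (prediction.length : Int))) 0
      false false [] 0 (by simp)
  simp only [] at h1 ⊢
  rw [h1, List.nil_append]
  have h2 := mainAB prediction (PySem.List.slice labels none (some (prediction.length : Int)))
      ((PySem.List.slice labels none (some (prediction.length : Int))).length : Int) 0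
      (by simp)
  exact h2.1
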